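-- pv_equiv track=rewrite | github.com/johnzhoudev/leetcode-practice | season_5_serious_prep/2429. Minimize XOR.py | solve
-- ===== SOURCE A (Python) =====
-- def solve(num1, num2):
--     def getSetBits(num):
--         setbits = 0
--         while num != 0:
--             setbits += num & 1
--             num >>= 1
--         return setbits
--
--     sbn1 = getSetBits(num1)
--     sbn2 = getSetBits(num2)
--
--     out = num1
--     bitmask = 1
--
--     while sbn1 != sbn2:
--         bit = num1 & 1
--
--         if sbn1 > sbn2: # at this position, how many more set bits are in num1?
--             # needs to be empty
--             out &= (~bitmask)
--             pass
--         elif sbn1 < sbn2: # sbn1 < sbn2, so less bits in num1 than num2. Therefore must set this one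
--             out |= bitmask
--             sbn2 -= 1
--         else:
--             break # if equal, can return early
--
--
--         if bit == 1:
--             sbn1 -= 1 # now past this set bit.
--
--         # advance
--         num1 >>= 1
--         bitmask *= 2
--
--     # set remaining bits if
--
--     return out
-- ===== SOURCE B (Python) =====
-- def solve(num1, num2):
--     res = num1
--     k = num2.bit_count() - num1.bit_count()
--     if k < 0:
--         for _ in range(-k):
--             res &= res - 1   # drop the lowest set bit
--     else:
--         for _ in range(k):
--             res |= res + 1   # set the lowest unset bit
--     return res
-- ===== Notes on version B (the rewrite author's own statement) =====
-- stated objective: simpler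
-- what changed: A scans bit positions with an explicit bitmask/shift loop and two running set-bit counters; B computes the popcount difference once and repeats the classic tricks res&=res-1 (drop lowest set bit) or res|=res+1 (set lowest unset bit) that many times, with no bitmask or counter bookkeeping.
import Mathlib
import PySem

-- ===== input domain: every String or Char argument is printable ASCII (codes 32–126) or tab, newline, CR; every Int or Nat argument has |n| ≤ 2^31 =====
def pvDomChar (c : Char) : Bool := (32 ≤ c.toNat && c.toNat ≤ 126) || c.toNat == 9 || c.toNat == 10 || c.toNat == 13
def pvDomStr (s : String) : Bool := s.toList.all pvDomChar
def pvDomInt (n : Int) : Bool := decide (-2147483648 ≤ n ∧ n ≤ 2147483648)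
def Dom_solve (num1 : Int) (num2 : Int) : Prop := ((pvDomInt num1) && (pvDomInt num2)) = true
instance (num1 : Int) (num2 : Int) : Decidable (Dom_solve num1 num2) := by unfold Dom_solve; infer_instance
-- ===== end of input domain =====

-- B replaces A's bit-position scan by |popcount(num2)-popcount(num1)| repetitions of
-- `res &= res-1` / `res |= res+1` (drop lowest set bit / set lowest unset bit): simpler, no bitmask bookkeeping.
-- Equality of the RETURN values is proved on Pre_ (both arguments nonnegative; A never terminates on negatives).

-- ===== PORT A =====
-- inner `while num != 0` of getSetBits; fuel only makes the loop total (on Pre_ it never runs out)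
def getSetBitsGo : Nat → Int → Int → Int
  | 0, setbits, _ => setbits
  | f + 1, setbits, num =>
    if num ≠ 0 then getSetBitsGo f (setbits + PySem.Int.band num 1) (num >>> (1 : Nat))
    else setbits

-- main `while sbn1 != sbn2` loop; fuel only makes the loop total (on Pre_ it never runs out)
def solveLoop : Nat → Int → Int → Int → Int → Int → Int
  | 0, _, _, out, _, _ => out
  | f + 1, sbn1, sbn2, out, num1, bitmask =>
    if sbn1 ≠ sbn2 then
      let bit := PySem.Int.band num1 1
      if sbn1 > sbn2 then
        solveLoop f (if bit = 1 then sbn1 - 1 else sbn1) sbn2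
          (PySem.Int.band out (Int.not bitmask)) (num1 >>> (1 : Nat)) (bitmask * 2)
      else if sbn1 < sbn2 then
        solveLoop f (if bit = 1 then sbn1 - 1 else sbn1) (sbn2 - 1)
          (PySem.Int.bor out bitmask) (num1 >>> (1 : Nat)) (bitmask * 2)
      else out  -- `break` (unreachable: the while-condition already gave sbn1 ≠ sbn2)
    else out

def solve (num1 : Int) (num2 : Int) : Int :=
  let sbn1 := getSetBitsGo (num1.natAbs + 1) 0 num1
  let sbn2 := getSetBitsGo (num2.natAbs + 1) 0 num2
  solveLoop (num1.natAbs + num2.natAbs + 1) sbn1 sbn2 num1 num1 1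

-- ===== PORT B =====
def solve_alt (num1 : Int) (num2 : Int) : Int :=
  let k : Int := (PySem.Int.bitCount num2 : Int) - (PySem.Int.bitCount num1 : Int)
  if k < 0 then
    (List.range (-k).toNat).foldl (fun res _ => PySem.Int.band res (res - 1)) num1
  else
    (List.range k.toNat).foldl (fun res _ => PySem.Int.bor res (res + 1)) num1

-- ===== PRECONDITION & SPEC =====
-- Pre_ excludes negative arguments: on any negative num1 or num2, A's getSetBits loop
-- (`while num != 0: num >>= 1`) never terminates, so A returns on exactly the inputs in Pre_.
def Pre_solve (num1 : Int) (num2 : Int) : Prop := 0 ≤ num1 ∧ 0 ≤ num2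
instance (num1 : Int) (num2 : Int) : Decidable (Pre_solve num1 num2) := by unfold Pre_solve; infer_instance
def pvWitness_solve : Int × Int := (3, 5)

def Spec_solve (num1 : Int) (num2 : Int) (out : Int) : Prop := out = solve_alt num1 num2
instance (num1 : Int) (num2 : Int) (out : Int) : Decidable (Spec_solve num1 num2 out) := by unfold Spec_solve; infer_instance

-- ===== CLAIM (what is proved, stated in full; the proofs are below) =====
def Claim_equal_solve : Prop := ∀ (num1 : Int) (num2 : Int), Dom_solve num1 num2 → Pre_solve num1 num2 → Spec_solve num1 num2 (solve num1 num2)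

-- ===== LEMMAS AND PROOFS =====

-- Nat-level popcount used by the proofs
def pc (n : Nat) : Nat :=
  if n = 0 then 0 else n % 2 + pc (n / 2)
decreasing_by exact Nat.div_lt_self (Nat.pos_of_ne_zero (by assumption)) one_lt_two

theorem pc_zero : pc 0 = 0 := by simp [pc]
theorem pc_pos_eq (n : Nat) (h : n ≠ 0) : pc n = n % 2 + pc (n / 2) := by
  rw [pc]; simp [h]

theorem pc_le (n : Nat) : pc n ≤ n := by
  induction n using Nat.strong_induction_on with
  | _ n ih =>
    rcases Nat.eq_zero_or_pos n with h | h
    · simp [h, pc_zero]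
    · rw [pc_pos_eq n (by omega)]
      have := ih (n / 2) (by omega)
      omega

theorem land_double (a b : Nat) (ba bb : Bool) :
    (2 * a + ba.toNat) &&& (2 * b + bb.toNat) = 2 * (a &&& b) + (ba && bb).toNat := by
  have h := Nat.bitwise_bit (f := and) (a := ba) (m := a) (b := bb) (n := b)
  cases ba <;> cases bb <;>
    simpa [Nat.bit, HAnd.hAnd, AndOp.and, Nat.land, Bool.toNat, mul_comm] using h
theorem lor_double (a b : Nat) (ba bb : Bool) :
    (2 * a + ba.toNat) ||| (2 * b + bb.toNat) = 2 * (a ||| b) + (ba || bb).toNat := by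
  have h := Nat.bitwise_bit (f := or) (a := ba) (m := a) (b := bb) (n := b)
  cases ba <;> cases bb <;>
    simpa [Nat.bit, HOr.hOr, OrOp.or, Nat.lor, Bool.toNat, mul_comm] using h
theorem land_d00 (a b : Nat) : (2*a) &&& (2*b) = 2*(a &&& b) := by simpa using land_double a b false false
theorem land_d10 (a b : Nat) : (2*a+1) &&& (2*b) = 2*(a &&& b) := by simpa using land_double a b true false
theorem lor_d10 (a b : Nat) : (2*a+1) ||| (2*b) = 2*(a ||| b)+1 := by simpa using lor_double a b true false
theorem lor_d01 (a b : Nat) : (2*a) ||| (2*b+1) = 2*(a ||| b)+1 := by simpa using lor_double a b false true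
def dropN (m : Nat) : Nat := m &&& (m - 1)
def setN (m : Nat) : Nat := m ||| (m + 1)
theorem drop_odd (s : Nat) : dropN (2 * s + 1) = 2 * s := by
  unfold dropN
  rw [(by omega : 2*s+1-1 = 2*s), land_d10]
  simp
theorem land_d01 (a b : Nat) : (2*a) &&& (2*b+1) = 2*(a &&& b) := by simpa using land_double a b false true
theorem drop_even (s : Nat) : dropN (2 * s) = 2 * dropN s := by
  rcases Nat.eq_zero_or_pos s with h | h
  · simp [h, dropN]
  · unfold dropN
    rw [(by omega : 2*s-1 = 2*(s-1)+1), land_d01]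
theorem set_even (s : Nat) : setN (2 * s) = 2 * s + 1 := by
  unfold setN
  rw [(by omega : 2*s+1 = 2*s+1)]
  rw [lor_d01]
  simp
theorem set_odd (s : Nat) : setN (2 * s + 1) = 2 * setN s + 1 := by
  unfold setN
  rw [(by omega : 2*s+1+1 = 2*(s+1)), lor_d10]

theorem land_shift_pow (n1 i : Nat) : (n1 * 2 ^ i) &&& 2 ^ i = n1 % 2 * 2 ^ i := by
  induction i generalizing n1 with
  | zero => simp [Nat.and_one_is_mod]
  | succ i ih =>
    calc (n1 * 2 ^ (i+1)) &&& 2 ^ (i+1)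
        = (2 * (n1 * 2 ^ i)) &&& (2 * 2 ^ i) := by
          rw [(by ring : n1 * 2 ^ (i+1) = 2 * (n1 * 2 ^ i)), (by ring : (2:Nat) ^ (i+1) = 2 * 2 ^ i)]
      _ = 2 * ((n1 * 2 ^ i) &&& 2 ^ i) := land_d00 _ _
      _ = 2 * (n1 % 2 * 2 ^ i) := by rw [ih]
      _ = n1 % 2 * 2 ^ (i+1) := by ring
theorem lor_low_even (m i : Nat) :
    (2 * m * 2 ^ i + (2 ^ i - 1)) ||| 2 ^ i = 2 * m * 2 ^ i + (2 ^ (i + 1) - 1) := by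
  induction i with
  | zero => simpa using lor_d01 m 0
  | succ i ih =>
    have hp : (1:Nat) ≤ 2 ^ i := Nat.one_le_two_pow
    have e1 : 2 * m * 2 ^ (i+1) + (2 ^ (i+1) - 1) = 2 * (2 * m * 2 ^ i + (2 ^ i - 1)) + 1 := by
      have h1 : 2 * m * 2 ^ (i+1) = 2 * (2 * m * 2 ^ i) := by ring
      have h2 : (2:Nat) ^ (i+1) = 2 * 2 ^ i := by ring
      omega
    calc (2 * m * 2 ^ (i+1) + (2 ^ (i+1) - 1)) ||| 2 ^ (i+1)
        = (2 * (2 * m * 2 ^ i + (2 ^ i - 1)) + 1) ||| (2 * 2 ^ i) := by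
          rw [e1, (by ring : (2:Nat) ^ (i+1) = 2 * 2 ^ i)]
      _ = 2 * ((2 * m * 2 ^ i + (2 ^ i - 1)) ||| 2 ^ i) + 1 := lor_d10 _ _
      _ = 2 * (2 * m * 2 ^ i + (2 ^ (i+1) - 1)) + 1 := by rw [ih]
      _ = 2 * m * 2 ^ (i+1) + (2 ^ (i+2) - 1) := by
          have h1 : 2 * m * 2 ^ (i+1) = 2 * (2 * m * 2 ^ i) := by ring
          have h2 : (2:Nat) ^ (i+2) = 2 * 2 ^ (i+1) := by ring
          have h3 : (2:Nat) ^ (i+1) = 2 * 2 ^ i := by ring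
          omega
theorem lor_d11 (a b : Nat) : (2*a+1) ||| (2*b+1) = 2*(a ||| b)+1 := by simpa using lor_double a b true true
theorem lor_low_odd (m i : Nat) :
    ((2 * m + 1) * 2 ^ i + (2 ^ i - 1)) ||| 2 ^ i = (2 * m + 1) * 2 ^ i + (2 ^ i - 1) := by
  induction i with
  | zero => simpa using lor_d11 m 0
  | succ i ih =>
    have hp : (1:Nat) ≤ 2 ^ i := Nat.one_le_two_pow
    have e1 : (2 * m + 1) * 2 ^ (i+1) + (2 ^ (i+1) - 1) = 2 * ((2 * m + 1) * 2 ^ i + (2 ^ i - 1)) + 1 := by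
      have h1 : (2 * m + 1) * 2 ^ (i+1) = 2 * ((2 * m + 1) * 2 ^ i) := by ring
      have h2 : (2:Nat) ^ (i+1) = 2 * 2 ^ i := by ring
      omega
    calc ((2 * m + 1) * 2 ^ (i+1) + (2 ^ (i+1) - 1)) ||| 2 ^ (i+1)
        = (2 * ((2 * m + 1) * 2 ^ i + (2 ^ i - 1)) + 1) ||| (2 * 2 ^ i) := by
          rw [e1, (by ring : (2:Nat) ^ (i+1) = 2 * 2 ^ i)]
      _ = 2 * (((2 * m + 1) * 2 ^ i + (2 ^ i - 1)) ||| 2 ^ i) + 1 := lor_d10 _ _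
      _ = 2 * ((2 * m + 1) * 2 ^ i + (2 ^ i - 1)) + 1 := by rw [ih]
      _ = (2 * m + 1) * 2 ^ (i+1) + (2 ^ (i+1) - 1) := e1.symm
theorem setN_low_even (m i : Nat) :
    setN (2 * m * 2 ^ i + (2 ^ i - 1)) = 2 * m * 2 ^ i + (2 ^ (i + 1) - 1) := by
  induction i with
  | zero => simpa using set_even m
  | succ i ih =>
    have hp : (1:Nat) ≤ 2 ^ i := Nat.one_le_two_pow
    have e1 : 2 * m * 2 ^ (i+1) + (2 ^ (i+1) - 1) = 2 * (2 * m * 2 ^ i + (2 ^ i - 1)) + 1 := by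
      have h1 : 2 * m * 2 ^ (i+1) = 2 * (2 * m * 2 ^ i) := by ring
      have h2 : (2:Nat) ^ (i+1) = 2 * 2 ^ i := by ring
      omega
    rw [e1, set_odd, ih]
    have h1 : 2 * m * 2 ^ (i+1) = 2 * (2 * m * 2 ^ i) := by ring
    have h2 : (2:Nat) ^ (i+2) = 2 * 2 ^ (i+1) := by ring
    have h3 : (2:Nat) ^ (i+1) = 2 * 2 ^ i := by ring
    omega

theorem dropIter_double (k m : Nat) : dropN^[k] (2 * m) = 2 * dropN^[k] m := by
  induction k generalizing m with
  | zero => simp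
  | succ k ih =>
    rw [Function.iterate_succ_apply, Function.iterate_succ_apply, drop_even, ih]

-- ==== bridge lemmas Int ↔ Nat for the primitive steps ====
theorem band_not_cast (m n : Nat) :
    PySem.Int.band (m : Int) (Int.not (n : Int)) = ((m - (m &&& n) : Nat) : Int) := by
  simp [PySem.Int.band, Int.not]

theorem shiftRight_one_cast (m : Nat) : ((m : Int) >>> (1 : Nat)) = ((m / 2 : Nat) : Int) := by
  rfl

theorem band_one_cast (m : Nat) : PySem.Int.band (m : Int) 1 = ((m % 2 : Nat) : Int) := by
  have : ((1:Int)) = ((1:Nat) : Int) := rfl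
  rw [this, PySem.Int.band_natCast]
  simp [Nat.and_one_is_mod]

theorem drop_cast (m : Nat) :
    PySem.Int.band (m : Int) ((m : Int) - 1) = ((dropN m : Nat) : Int) := by
  cases m with
  | zero => decide
  | succ s =>
    have : ((s + 1 : Nat) : Int) - 1 = ((s : Nat) : Int) := by push_cast; ring
    rw [this, PySem.Int.band_natCast]
    rfl

theorem set_cast (m : Nat) :
    PySem.Int.bor (m : Int) ((m : Int) + 1) = ((setN m : Nat) : Int) := by
  have : ((m : Nat) : Int) + 1 = ((m + 1 : Nat) : Int) := by push_cast; ring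
  rw [this, PySem.Int.bor_natCast]
  rfl

theorem bitCount_eq_pc (n : Nat) : PySem.Int.bitCount (n : Int) = pc n := by
  induction n using Nat.strong_induction_on with
  | _ n ih =>
    rcases Nat.eq_zero_or_pos n with h | h
    · simp [h, pc_zero]
    · rw [PySem.Int.bitCount_natCast (by omega), ih (n / 2) (by omega), pc_pos_eq n (by omega)]

-- A's getSetBits computes pc
theorem getSetBitsGo_eq (f : Nat) : ∀ (n : Nat) (acc : Int), n < f →
    getSetBitsGo f acc (n : Int) = acc + (pc n : Int) := by
  induction f with
  | zero => intro n acc h; omega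
  | succ f ih =>
    intro n acc h
    rcases Nat.eq_zero_or_pos n with h0 | h0
    · simp [h0, getSetBitsGo, pc_zero]
    · rw [getSetBitsGo]
      have hne : (n : Int) ≠ 0 := by exact_mod_cast h0.ne'
      rw [if_pos hne, band_one_cast, shiftRight_one_cast, ih (n / 2) _ (by omega),
        pc_pos_eq n (by omega)]
      push_cast; ring

-- ==== the two main loop characterizations ====
theorem solveLoop_gt (f : Nat) : ∀ (n1 t i : Nat), t ≤ pc n1 → n1 < f →
    solveLoop f (pc n1 : Int) (t : Int) ((n1 * 2 ^ i : Nat) : Int) (n1 : Int) ((2 ^ i : Nat) : Int)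
      = ((dropN^[pc n1 - t] n1 * 2 ^ i : Nat) : Int) := by
  induction f with
  | zero => intro n1 t i h hf; omega
  | succ f ih =>
    intro n1 t i h hf
    by_cases heq : pc n1 = t
    · have hc : ((pc n1 : Nat) : Int) = (t : Int) := by exact_mod_cast heq
      rw [solveLoop, if_neg (not_not_intro hc)]
      rw [heq, Nat.sub_self]
      simp
    · have hlt : t < pc n1 := lt_of_le_of_ne h (fun e => heq e.symm)
      have hn1 : n1 ≠ 0 := by
        intro e; rw [e, pc_zero] at hlt; omega
      have hne : ((pc n1 : Int)) ≠ (t : Int) := by exact_mod_cast heq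
      have hgt : ((pc n1 : Int)) > (t : Int) := by exact_mod_cast hlt
      rw [solveLoop, if_pos hne]
      simp only [if_pos hgt, band_one_cast, band_not_cast, land_shift_pow, shiftRight_one_cast]
      have eout : n1 * 2 ^ i - n1 % 2 * 2 ^ i = (n1 / 2) * 2 ^ (i + 1) := by
        have h1 : 2 * (n1 / 2) + n1 % 2 = n1 := by omega
        have h2 : (n1 / 2) * 2 ^ (i + 1) = 2 * ((n1 / 2) * 2 ^ i) := by ring
        have h3 : n1 * 2 ^ i = 2 * ((n1 / 2) * 2 ^ i) + (n1 % 2) * 2 ^ i := by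
          calc n1 * 2 ^ i = (2 * (n1 / 2) + n1 % 2) * 2 ^ i := by rw [h1]
            _ = 2 * ((n1 / 2) * 2 ^ i) + (n1 % 2) * 2 ^ i := by ring
        omega
      rw [eout]
      have ebm : ((2 ^ i : Nat) : Int) * 2 = ((2 ^ (i + 1) : Nat) : Int) := by push_cast [pow_succ]; ring
      rw [ebm]
      have hpc : pc n1 = n1 % 2 + pc (n1 / 2) := pc_pos_eq n1 hn1
      rcases Nat.mod_two_eq_zero_or_one n1 with hp | hp
      · -- even
        rw [hp] at hpc ⊢
        rw [if_neg (by norm_num : ¬ (((0 : Nat) : Int) = 1))]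
        have hpc' : pc (n1 / 2) = pc n1 := by omega
        rw [show ((pc n1 : Nat) : Int) = ((pc (n1 / 2) : Nat) : Int) by rw [hpc']]
        rw [ih (n1 / 2) t (i + 1) (by omega) (by omega)]
        congr 1
        rw [hpc']
        have e2 : n1 = 2 * (n1 / 2) := by omega
        calc dropN^[pc n1 - t] (n1 / 2) * 2 ^ (i + 1)
            = (2 * dropN^[pc n1 - t] (n1 / 2)) * 2 ^ i := by ring
          _ = dropN^[pc n1 - t] (2 * (n1 / 2)) * 2 ^ i := by rw [dropIter_double]
          _ = dropN^[pc n1 - t] n1 * 2 ^ i := by rw [← e2]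
      · -- odd
        rw [hp] at hpc ⊢
        rw [if_pos (by norm_num : (((1 : Nat) : Int) = 1))]
        have hpc' : pc (n1 / 2) = pc n1 - 1 := by omega
        rw [show ((pc n1 : Nat) : Int) - 1 = ((pc (n1 / 2) : Nat) : Int) by rw [hpc']; omega]
        rw [ih (n1 / 2) t (i + 1) (by omega) (by omega)]
        congr 1
        have e2 : n1 = 2 * (n1 / 2) + 1 := by omega
        have e3 : pc n1 - t = (pc (n1 / 2) - t) + 1 := by omega
        calc dropN^[pc (n1 / 2) - t] (n1 / 2) * 2 ^ (i + 1)
            = (2 * dropN^[pc (n1 / 2) - t] (n1 / 2)) * 2 ^ i := by ring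
          _ = dropN^[pc (n1 / 2) - t] (2 * (n1 / 2)) * 2 ^ i := by rw [dropIter_double]
          _ = dropN^[pc (n1 / 2) - t] (dropN n1) * 2 ^ i := by
              have e4 : dropN n1 = 2 * (n1 / 2) := by conv_lhs => rw [e2, drop_odd]
              rw [e4]
          _ = dropN^[pc n1 - t] n1 * 2 ^ i := by rw [e3, Function.iterate_succ_apply]

theorem solveLoop_lt (f : Nat) : ∀ (n1 t i : Nat), pc n1 ≤ t → n1 + (t - pc n1) < f →
    solveLoop f (pc n1 : Int) (t : Int) ((n1 * 2 ^ i + (2 ^ i - 1) : Nat) : Int) (n1 : Int) ((2 ^ i : Nat) : Int)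
      = ((setN^[t - pc n1] (n1 * 2 ^ i + (2 ^ i - 1)) : Nat) : Int) := by
  induction f with
  | zero => intro n1 t i h hf; omega
  | succ f ih =>
    intro n1 t i h hf
    have hp1 : (1 : Nat) ≤ 2 ^ i := Nat.one_le_two_pow
    have hp2 : (1 : Nat) ≤ 2 ^ (i + 1) := Nat.one_le_two_pow
    have hpow : (2 : Nat) ^ (i + 1) = 2 * 2 ^ i := by ring
    by_cases heq : pc n1 = t
    · have hc : ((pc n1 : Nat) : Int) = (t : Int) := by exact_mod_cast heq
      rw [solveLoop, if_neg (not_not_intro hc)]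
      rw [heq, Nat.sub_self]
      simp
    · have hlt : pc n1 < t := lt_of_le_of_ne h heq
      have hne : ((pc n1 : Nat) : Int) ≠ (t : Int) := by exact_mod_cast heq
      have hngt : ¬ (((pc n1 : Nat) : Int) > (t : Int)) := by exact_mod_cast Nat.not_lt.mpr h
      have hlt' : (((pc n1 : Nat) : Int) < (t : Int)) := by exact_mod_cast hlt
      rw [solveLoop, if_pos hne]
      simp only [if_neg hngt, if_pos hlt', band_one_cast, shiftRight_one_cast]
      rw [show ((n1 * 2 ^ i + (2 ^ i - 1) : Nat) : Int) = (((n1 * 2 ^ i + (2 ^ i - 1) : Nat)) : Int) from rfl]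
      rw [show PySem.Int.bor ((n1 * 2 ^ i + (2 ^ i - 1) : Nat) : Int) ((2 ^ i : Nat) : Int)
            = (((n1 * 2 ^ i + (2 ^ i - 1)) ||| 2 ^ i : Nat) : Int) from PySem.Int.bor_natCast _ _]
      have ebm : ((2 ^ i : Nat) : Int) * 2 = ((2 ^ (i + 1) : Nat) : Int) := by push_cast [pow_succ]; ring
      rw [ebm]
      have ht1 : ((t : Nat) : Int) - 1 = ((t - 1 : Nat) : Int) := by
        have : 1 ≤ t := by omega
        push_cast [this]; ring
      rw [ht1]
      have hpc : pc n1 = n1 % 2 + pc (n1 / 2) := by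
        rcases Nat.eq_zero_or_pos n1 with h0 | h0
        · simp [h0, pc_zero]
        · exact pc_pos_eq n1 (by omega)
      rcases Nat.mod_two_eq_zero_or_one n1 with hp | hp
      · -- even n1 = 2 * (n1 / 2)
        have e2 : n1 = 2 * (n1 / 2) := by omega
        rw [hp]
        rw [if_neg (by norm_num : ¬ (((0 : Nat) : Int) = 1))]
        have hpc' : pc (n1 / 2) = pc n1 := by omega
        have eor : (n1 * 2 ^ i + (2 ^ i - 1)) ||| 2 ^ i = (n1 / 2) * 2 ^ (i + 1) + (2 ^ (i + 1) - 1) := by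
          have h1 := lor_low_even (n1 / 2) i
          have h2 : 2 * (n1 / 2) * 2 ^ i = n1 * 2 ^ i := by rw [← e2]
          have h3 : (n1 / 2) * 2 ^ (i + 1) = 2 * (n1 / 2) * 2 ^ i := by ring
          rw [h2] at h1
          omega
        rw [eor]
        rw [show ((pc n1 : Nat) : Int) = ((pc (n1 / 2) : Nat) : Int) by rw [hpc']]
        rw [ih (n1 / 2) (t - 1) (i + 1) (by omega) (by omega)]
        congr 1
        have egap : t - pc n1 = ((t - 1) - pc (n1 / 2)) + 1 := by omega
        rw [egap, Function.iterate_succ_apply]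
        congr 1
        have h4 := setN_low_even (n1 / 2) i
        have h2 : 2 * (n1 / 2) * 2 ^ i = n1 * 2 ^ i := by rw [← e2]
        have h3 : (n1 / 2) * 2 ^ (i + 1) = 2 * (n1 / 2) * 2 ^ i := by ring
        rw [h2] at h4
        omega
      · -- odd n1 = 2 * (n1 / 2) + 1
        have e2 : n1 = 2 * (n1 / 2) + 1 := by omega
        rw [hp]
        rw [if_pos (by norm_num : (((1 : Nat) : Int) = 1))]
        have hpc' : pc (n1 / 2) = pc n1 - 1 := by omega
        rw [show ((pc n1 : Nat) : Int) - 1 = ((pc (n1 / 2) : Nat) : Int) by rw [hpc']; omega]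
        have eor : (n1 * 2 ^ i + (2 ^ i - 1)) ||| 2 ^ i = (n1 / 2) * 2 ^ (i + 1) + (2 ^ (i + 1) - 1) := by
          have h1 := lor_low_odd (n1 / 2) i
          have h2 : (2 * (n1 / 2) + 1) * 2 ^ i = n1 * 2 ^ i := by rw [← e2]
          have h3 : (n1 / 2) * 2 ^ (i + 1) + (2 ^ (i + 1) - 1) = (2 * (n1 / 2) + 1) * 2 ^ i + (2 ^ i - 1) := by
            have h4 : (n1 / 2) * 2 ^ (i + 1) = 2 * ((n1 / 2) * 2 ^ i) := by ring
            have h5 : (2 * (n1 / 2) + 1) * 2 ^ i = 2 * ((n1 / 2) * 2 ^ i) + 2 ^ i := by ring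
            omega
          rw [h2] at h1
          omega
        rw [eor]
        rw [ih (n1 / 2) (t - 1) (i + 1) (by omega) (by omega)]
        have egap : t - 1 - pc (n1 / 2) = t - pc n1 := by omega
        have earg : (n1 / 2) * 2 ^ (i + 1) + (2 ^ (i + 1) - 1) = n1 * 2 ^ i + (2 ^ i - 1) := by
          have h2 : (2 * (n1 / 2) + 1) * 2 ^ i = n1 * 2 ^ i := by rw [← e2]
          have h4 : (n1 / 2) * 2 ^ (i + 1) = 2 * ((n1 / 2) * 2 ^ i) := by ring
          have h5 : (2 * (n1 / 2) + 1) * 2 ^ i = 2 * ((n1 / 2) * 2 ^ i) + 2 ^ i := by ring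
          omega
        rw [egap, earg]

-- ==== B-side: the fold is an iterate ====
theorem foldl_range_iterate {α : Type} (g : α → α) (k : Nat) (a : α) :
    (List.range k).foldl (fun r _ => g r) a = g^[k] a := by
  induction k with
  | zero => simp
  | succ k ih => rw [List.range_succ, List.foldl_append, ih, Function.iterate_succ_apply']; rfl

theorem foldl_drop_cast (k : Nat) (m : Nat) :
    (List.range k).foldl (fun res _ => PySem.Int.band res (res - 1)) ((m : Nat) : Int)
      = ((dropN^[k] m : Nat) : Int) := by
  rw [foldl_range_iterate]
  induction k generalizing m with
  | zero => simp
  | succ k ih => rw [Function.iterate_succ_apply, Function.iterate_succ_apply, drop_cast, ih]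

theorem foldl_set_cast (k : Nat) (m : Nat) :
    (List.range k).foldl (fun res _ => PySem.Int.bor res (res + 1)) ((m : Nat) : Int)
      = ((setN^[k] m : Nat) : Int) := by
  rw [foldl_range_iterate]
  induction k generalizing m with
  | zero => simp
  | succ k ih => rw [Function.iterate_succ_apply, Function.iterate_succ_apply, set_cast, ih]

-- ===== VERDICT (by name: the statement is the Claim_ definition above) =====
-- instantiations of the loop lemmas at i = 0
theorem solveLoop_gt0 (f : Nat) (n1 t : Nat) (h : t ≤ pc n1) (hf : n1 < f) :
    solveLoop f (pc n1 : Int) (t : Int) (n1 : Int) (n1 : Int) 1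
      = ((dropN^[pc n1 - t] n1 : Nat) : Int) := by
  have h0 := solveLoop_gt f n1 t 0 h hf
  simpa using h0

theorem solveLoop_lt0 (f : Nat) (n1 t : Nat) (h : pc n1 ≤ t) (hf : n1 + (t - pc n1) < f) :
    solveLoop f (pc n1 : Int) (t : Int) (n1 : Int) (n1 : Int) 1
      = ((setN^[t - pc n1] n1 : Nat) : Int) := by
  have h0 := solveLoop_lt f n1 t 0 h hf
  simpa using h0

theorem solve_spec : Claim_equal_solve := by
  intro num1 num2 _hdom hpre
  obtain ⟨h1, h2⟩ := hpre
  unfold Spec_solve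
  obtain ⟨n1, rfl⟩ : ∃ n : Nat, (n : Int) = num1 := ⟨num1.toNat, Int.toNat_of_nonneg h1⟩
  obtain ⟨n2, rfl⟩ : ∃ n : Nat, (n : Int) = num2 := ⟨num2.toNat, Int.toNat_of_nonneg h2⟩
  unfold solve solve_alt
  simp only [Int.natAbs_natCast, bitCount_eq_pc]
  rw [getSetBitsGo_eq (n1 + 1) n1 0 (by omega), getSetBitsGo_eq (n2 + 1) n2 0 (by omega)]
  rw [zero_add, zero_add]
  rcases Nat.lt_trichotomy (pc n2) (pc n1) with hc | hc | hc
  · -- A drops bits; B's k is negative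
    rw [solveLoop_gt0 (n1 + n2 + 1) n1 (pc n2) (by omega) (by omega)]
    have hk : (((pc n2 : Nat) : Int) - ((pc n1 : Nat) : Int)) < 0 := by omega
    rw [if_pos hk]
    have hkt : (-(((pc n2 : Nat) : Int) - ((pc n1 : Nat) : Int))).toNat = pc n1 - pc n2 := by omega
    rw [hkt, foldl_drop_cast]
  · -- equal popcounts: A's while-condition is false at once; B's k is 0
    have hc' : ((pc n1 : Nat) : Int) = ((pc n2 : Nat) : Int) := by exact_mod_cast hc.symm
    rw [solveLoop, if_neg (not_not_intro hc')]
    have hk0 : (((pc n2 : Nat) : Int) - ((pc n1 : Nat) : Int)) = 0 := by omega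
    rw [hk0]
    norm_num
  · -- A sets bits; B's k is positive
    have hle : pc n2 ≤ n2 := pc_le n2
    rw [solveLoop_lt0 (n1 + n2 + 1) n1 (pc n2) (by omega) (by omega)]
    have hk : ¬ ((((pc n2 : Nat) : Int) - ((pc n1 : Nat) : Int)) < 0) := by omega
    rw [if_neg hk]
    have hkt : ((((pc n2 : Nat) : Int) - ((pc n1 : Nat) : Int))).toNat = pc n2 - pc n1 := by omega
    rw [hkt, foldl_set_cast]
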